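-- pv_equiv track=rewrite | github.com/guvzan/Game-Of-8 | Main/main.py | countManhattan
-- ===== SOURCE A (Python) =====
-- def countManhattan(array, endArray):            #Функція, що повертає значення манхеттенської відстані
--     distance = 0
--     for i in range(0, 3):
--         for j in range(0, 3):
--             for k in range(0, 3):
--                 for l in range(0, 3):
--                     if(endArray[k][l]==array[i][j]):
--                         distance+=abs(i-k)+abs(j-l)
--     return(distance)
-- ===== SOURCE B (Python) =====
-- def countManhattan(array, endArray):
--     positions = {}
--     for k in range(0, 3):
--         for l in range(0, 3):
--             positions.setdefault(endArray[k][l], []).append((k, l))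
--     distance = 0
--     for i in range(0, 3):
--         for j in range(0, 3):
--             for (k, l) in positions.get(array[i][j], []):
--                 distance += abs(i - k) + abs(j - l)
--     return distance
-- ===== Notes on version B (the rewrite author's own statement) =====
-- stated objective: alternative
-- what changed: Replaces the quadruple nested scan (for every source cell, rescan the whole goal board) with a dict built in one pass over endArray mapping each value to the list of its positions, then a single pass over array with lookups; position lists keep A's summing over all duplicate matches.
import Mathlib
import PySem

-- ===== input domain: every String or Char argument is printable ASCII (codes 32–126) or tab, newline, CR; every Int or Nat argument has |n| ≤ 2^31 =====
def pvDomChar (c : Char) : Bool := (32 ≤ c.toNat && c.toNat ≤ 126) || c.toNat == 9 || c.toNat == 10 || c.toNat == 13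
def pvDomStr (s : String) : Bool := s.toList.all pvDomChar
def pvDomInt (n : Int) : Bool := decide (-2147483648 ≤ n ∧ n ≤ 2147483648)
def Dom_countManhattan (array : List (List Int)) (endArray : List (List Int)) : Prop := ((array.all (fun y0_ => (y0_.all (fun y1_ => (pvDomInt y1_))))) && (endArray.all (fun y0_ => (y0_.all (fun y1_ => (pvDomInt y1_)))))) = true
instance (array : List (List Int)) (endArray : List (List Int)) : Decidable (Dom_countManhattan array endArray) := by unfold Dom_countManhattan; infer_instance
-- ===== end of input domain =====

-- B replaces A's quadruple nested scan by a dict of goal positions built once, then a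
-- single pass over the source board with lookups (objective: alternative algorithm).

-- ===== PORT A =====
-- m[i][j]; exact (via PySem.List.pyGet?) whenever the indices are in range, which
-- Pre_countManhattan guarantees for all indices the ports use.
def pvCell (m : List (List Int)) (i j : Int) : Int :=
  (PySem.List.pyGet? ((PySem.List.pyGet? m i).getD []) j).getD 0

def countManhattan (array : List (List Int)) (endArray : List (List Int)) : Int :=
  (PySem.List.pyRange 0 3 1).foldl (fun d i =>
    (PySem.List.pyRange 0 3 1).foldl (fun d j =>
      (PySem.List.pyRange 0 3 1).foldl (fun d k =>
        (PySem.List.pyRange 0 3 1).foldl (fun d l =>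
          if pvCell endArray k l == pvCell array i j then d + (|i - k| + |j - l|) else d)
        d) d) d) 0

-- ===== PORT B =====
def countManhattan_alt (array : List (List Int)) (endArray : List (List Int)) : Int :=
  let positions : PySem.Dict Int (List (Int × Int)) :=
    (PySem.List.pyRange 0 3 1).foldl (fun d k =>
      (PySem.List.pyRange 0 3 1).foldl (fun d l =>
        d.insert (pvCell endArray k l) (d.getD (pvCell endArray k l) [] ++ [(k, l)])) d)
      PySem.Dict.empty
  (PySem.List.pyRange 0 3 1).foldl (fun dist i =>
    (PySem.List.pyRange 0 3 1).foldl (fun dist j =>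
      (positions.getD (pvCell array i j) []).foldl (fun dist p =>
        dist + (|i - p.1| + |j - p.2|)) dist) dist) 0

-- ===== PRECONDITION & SPEC =====
-- Pre_ excludes exactly the inputs where the Python A raises IndexError: boards with
-- fewer than 3 rows or a row among the first 3 shorter than 3 entries.
def Pre_countManhattan (array : List (List Int)) (endArray : List (List Int)) : Prop :=
  (3 ≤ array.length ∧ ∀ r ∈ array.take 3, 3 ≤ r.length) ∧
  (3 ≤ endArray.length ∧ ∀ r ∈ endArray.take 3, 3 ≤ r.length)
instance (array : List (List Int)) (endArray : List (List Int)) : Decidable (Pre_countManhattan array endArray) := by unfold Pre_countManhattan; infer_instance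

def pvWitness_countManhattan : List (List Int) × List (List Int) :=
  ([[1,2,3],[4,5,6],[7,8,0]], [[0,1,2],[3,4,5],[6,7,8]])

def Spec_countManhattan (array : List (List Int)) (endArray : List (List Int)) (out : Int) : Prop := out = countManhattan_alt array endArray
instance (array : List (List Int)) (endArray : List (List Int)) (out : Int) : Decidable (Spec_countManhattan array endArray out) := by unfold Spec_countManhattan; infer_instance

-- ===== CLAIM (what is proved, stated in full; the proofs are below) =====
def Claim_equal_countManhattan : Prop := ∀ (array : List (List Int)) (endArray : List (List Int)), Dom_countManhattan array endArray → Pre_countManhattan array endArray → Spec_countManhattan array endArray (countManhattan array endArray)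

-- ===== LEMMAS AND PROOFS =====

theorem pvRange3 : PySem.List.pyRange 0 3 1 = [0, 1, 2] := by decide

-- The nine build/scan positions, in the order both ports traverse them.
def pvPos : List (Int × Int) :=
  [(0,0),(0,1),(0,2),(1,0),(1,1),(1,2),(2,0),(2,1),(2,2)]

-- The dict built by appending each position to the list stored under its value holds,
-- under each key x, exactly the positions (in order) whose value is x.
theorem pv_build_getD (f : Int × Int → Int) :
    ∀ (qs : List (Int × Int)) (d : PySem.Dict Int (List (Int × Int))) (x : Int),
      (qs.foldl (fun d q => d.insert (f q) (d.getD (f q) [] ++ [q])) d).getD x []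
        = d.getD x [] ++ qs.filter (fun q => f q == x) := by
  intro qs
  induction qs with
  | nil => intro d x; simp
  | cons q qs ih =>
    intro d x
    simp only [List.foldl_cons, List.filter_cons]
    rw [ih]
    by_cases h : f q = x
    · subst h; simp
    · rw [PySem.Dict.getD_insert, if_neg (fun hh => h hh.symm)]
      simp [h, beq_iff_eq]

-- A conditional-accumulate fold equals the plain fold over the filtered list.
theorem pv_fold_filter (c : Int × Int → Bool) (h : Int × Int → Int) :
    ∀ (qs : List (Int × Int)) (s : Int),
      qs.foldl (fun acc q => if c q then acc + h q else acc) s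
        = (qs.filter c).foldl (fun acc q => acc + h q) s := by
  intro qs
  induction qs with
  | nil => intro s; rfl
  | cons q qs ih =>
    intro s
    simp only [List.foldl_cons, List.filter_cons]
    by_cases hc : c q <;> simp [hc, ih]

-- For a fixed source cell, A's inner double scan equals B's fold over the stored list.
theorem pv_inner (array endArray : List (List Int)) (i j : Int) (s : Int) :
    (PySem.List.pyRange 0 3 1).foldl (fun d k =>
        (PySem.List.pyRange 0 3 1).foldl (fun d l =>
          if pvCell endArray k l == pvCell array i j then d + (|i - k| + |j - l|) else d)
        d) s
      = ((((PySem.List.pyRange 0 3 1).foldl (fun d k =>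
            (PySem.List.pyRange 0 3 1).foldl (fun d l =>
              d.insert (pvCell endArray k l) (d.getD (pvCell endArray k l) [] ++ [(k, l)])) d)
          PySem.Dict.empty)).getD (pvCell array i j) []).foldl
          (fun dist p => dist + (|i - p.1| + |j - p.2|)) s := by
  have hbuild : ((PySem.List.pyRange 0 3 1).foldl (fun d k =>
      (PySem.List.pyRange 0 3 1).foldl (fun d l =>
        d.insert (pvCell endArray k l) (d.getD (pvCell endArray k l) [] ++ [(k, l)])) d)
      (PySem.Dict.empty : PySem.Dict Int (List (Int × Int))))
      = pvPos.foldl (fun d q =>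
          d.insert (pvCell endArray q.1 q.2) (d.getD (pvCell endArray q.1 q.2) [] ++ [q]))
          PySem.Dict.empty := by
    simp only [pvRange3, pvPos, List.foldl_cons, List.foldl_nil]
  have hscan : (PySem.List.pyRange 0 3 1).foldl (fun d k =>
      (PySem.List.pyRange 0 3 1).foldl (fun d l =>
        if pvCell endArray k l == pvCell array i j then d + (|i - k| + |j - l|) else d) d) s
      = pvPos.foldl (fun d q =>
          if pvCell endArray q.1 q.2 == pvCell array i j then d + (|i - q.1| + |j - q.2|)
          else d) s := by
    simp only [pvRange3, pvPos, List.foldl_cons, List.foldl_nil]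
  rw [hbuild, hscan,
    pv_build_getD (fun q => pvCell endArray q.1 q.2) pvPos PySem.Dict.empty (pvCell array i j),
    pv_fold_filter (fun q => pvCell endArray q.1 q.2 == pvCell array i j)
      (fun q => |i - q.1| + |j - q.2|) pvPos s]
  simp

-- Extensionality of foldl in its step function.
theorem pv_foldl_ext {α β : Type} (f g : β → α → β) (l : List α) (s : β)
    (h : ∀ b a, f b a = g b a) : l.foldl f s = l.foldl g s := by
  have : f = g := funext fun b => funext fun a => h b a
  rw [this]

-- ===== VERDICT (by name: the statement is the Claim_ definition above) =====
theorem countManhattan_spec : Claim_equal_countManhattan := by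
  intro array endArray _ _
  show countManhattan array endArray = countManhattan_alt array endArray
  unfold countManhattan countManhattan_alt
  refine pv_foldl_ext _ _ _ _ (fun d i => ?_)
  refine pv_foldl_ext _ _ _ _ (fun d j => ?_)
  exact pv_inner array endArray i j d
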